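-- pv_equiv track=rewrite | github.com/papai0709/CodePulse | analyzer/issue_detector.py | _count_python_function_lines
-- ===== SOURCE A (Python) =====
-- from typing import Dict, List, Any, Optional
--
-- def _count_python_function_lines(lines: List[str]) -> List[tuple]:
--     """Count lines in Python functions"""
--     functions = []
--     current_function = None
--     function_start = 0
--     indent_level = 0
--
--     for i, line in enumerate(lines):
--         stripped = line.strip()
--
--         # Find function definition
--         if stripped.startswith('def ') and ':' in stripped:
--             if current_function:
--                 # End previous function
--                 functions.append((current_function, i - function_start, function_start + 1))
--
--             # Start new function
--             current_function = stripped.split('(')[0].replace('def ', '')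
--             function_start = i
--             indent_level = len(line) - len(line.lstrip())
--
--         elif current_function and stripped and not line.startswith(' ' * (indent_level + 1)) and not stripped.startswith('#'):
--             # Function ended
--             if not stripped.startswith('def '):
--                 functions.append((current_function, i - function_start, function_start + 1))
--                 current_function = None
--
--     # Handle last function
--     if current_function:
--         functions.append((current_function, len(lines) - function_start, function_start + 1))
--
--     return functions
-- ===== SOURCE B (Python) =====
-- def _count_python_function_lines(lines):
--     """Count lines in Python functions (two-phase: collect def indices, then rescan per function)."""
--     def is_def(line):
--         s = line.strip()
--         return s.startswith('def ') and ':' in s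
--
--     def is_term(indent, line):
--         st = line.strip()
--         return bool(st) and not line.startswith(' ' * (indent + 1)) and not st.startswith('#') and not st.startswith('def ')
--
--     starts = [i for i, line in enumerate(lines) if is_def(line)]
--
--     functions = []
--     for s in starts:
--         line = lines[s]
--         name = line.strip().split('(')[0].replace('def ', '')
--         if not name:
--             continue
--         indent = len(line) - len(line.lstrip())
--         end = len(lines)
--         for j in range(s + 1, len(lines)):
--             nxt = lines[j]
--             if is_def(nxt):
--                 end = j
--                 break
--             if is_term(indent, nxt):
--                 end = j
--                 break
--         functions.append((name, end - s, s + 1))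
--     return functions
-- ===== Notes on version B (the rewrite author's own statement) =====
-- stated objective: alternative
-- what changed: A's single-pass state machine (current function name/start/indent carried through one enumerate loop, closed on the next def or a dedent line or at EOF) is replaced by a two-phase plan: first collect the indices of all def-with-colon lines, then for each collected start recover its name and indent and rescan forward to the terminating line (next def, or a non-comment non-indented non-def line, else EOF).
import Mathlib
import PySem

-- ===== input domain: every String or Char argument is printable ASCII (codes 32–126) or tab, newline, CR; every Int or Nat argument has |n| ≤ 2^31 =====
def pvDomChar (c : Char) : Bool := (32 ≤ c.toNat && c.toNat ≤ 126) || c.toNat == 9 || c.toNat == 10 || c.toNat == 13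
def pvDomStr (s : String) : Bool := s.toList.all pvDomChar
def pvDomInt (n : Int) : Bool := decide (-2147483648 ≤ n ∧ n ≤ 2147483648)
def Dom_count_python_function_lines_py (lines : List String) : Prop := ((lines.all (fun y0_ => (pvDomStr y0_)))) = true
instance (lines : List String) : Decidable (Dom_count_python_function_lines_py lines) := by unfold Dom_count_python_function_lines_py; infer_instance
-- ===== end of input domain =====

-- B re-implements A's one-pass state machine as two phases (collect def-line indices, then rescan
-- forward from each def to find its end); same return value, objective: alternative decomposition.

-- shared helpers (the exact expressions both Pythons evaluate)
-- ' ' * n for 0 ≤ n (the only use has n = indent + 1 ≥ 1)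
def pvSpaces (n : Int) : String := String.ofList (List.replicate n.toNat ' ')

-- ===== PORT A =====
def pvTruthy (cur : Option String) : Bool := match cur with | none => false | some s => !(s == "")

def pvAStep (st : List (String × Int × Int) × Option String × Int × Int) (p : Int × String) :
    List (String × Int × Int) × Option String × Int × Int :=
  let (functions, cur, fstart, indent) := st
  let i := p.1
  let line := p.2
  let stripped := PySem.Str.strip line
  if PySem.Str.startswith stripped "def " && PySem.Str.isIn ":" stripped then
    let functions := if pvTruthy cur then functions ++ [(cur.getD "", i - fstart, fstart + 1)] else functions
    -- stripped.split('(')[0]: split? with a nonempty separator is always `some` of a nonempty list,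
    -- so getD/headD defaults are never taken and [0] is exact
    let name := PySem.Str.replace (((PySem.Str.split? stripped "(").getD []).headD "") "def " ""
    (functions, some name, i, PySem.Str.len line - PySem.Str.len (PySem.Str.lstrip line))
  else if pvTruthy cur && !(stripped == "") && !(PySem.Str.startswith line (pvSpaces (indent + 1))) && !(PySem.Str.startswith stripped "#") then
    if !(PySem.Str.startswith stripped "def ") then
      (functions ++ [(cur.getD "", i - fstart, fstart + 1)], none, fstart, indent)
    else (functions, cur, fstart, indent)
  else (functions, cur, fstart, indent)

def count_python_function_lines_py (lines : List String) : List (String × Int × Int) :=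
  let fin := (PySem.List.enumerate lines 0).foldl pvAStep ([], none, 0, 0)
  if pvTruthy fin.2.1 then
    fin.1 ++ [(fin.2.1.getD "", PySem.List.len lines - fin.2.2.1, fin.2.2.1 + 1)]
  else fin.1

-- ===== PORT B =====
def pvIsDefLine (line : String) : Bool :=
  let s := PySem.Str.strip line
  PySem.Str.startswith s "def " && PySem.Str.isIn ":" s

-- the line terminating an open function (Source B's is_term)
def pvIsTerm (indent : Int) (line : String) : Bool :=
  let st := PySem.Str.strip line
  !(st == "") && !(PySem.Str.startswith line (pvSpaces (indent + 1))) && !(PySem.Str.startswith st "#") && !(PySem.Str.startswith st "def ")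

-- line.strip().split('(')[0].replace('def ', '') (defaults never taken, see pvAStep comment)
def pvNameOf (line : String) : String :=
  PySem.Str.replace (((PySem.Str.split? (PySem.Str.strip line) "(").getD []).headD "") "def " ""

def pvIndentOf (line : String) : Int := PySem.Str.len line - PySem.Str.len (PySem.Str.lstrip line)

-- the inner `for j in range(s+1, len(lines))` with its two breaks; falls off the range → e (= len(lines))
def pvScanEnd (lines : List String) (indent : Int) : List Int → Int → Int
  | [], e => e
  | j :: js, e =>
    let nxt := PySem.List.pyGetD lines j ""   -- lines[j]; j is always in range here
    if pvIsDefLine nxt then j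
    else if pvIsTerm indent nxt then j
    else pvScanEnd lines indent js e

def count_python_function_lines_py_alt (lines : List String) : List (String × Int × Int) :=
  let starts := ((PySem.List.enumerate lines 0).filter (fun p => pvIsDefLine p.2)).map Prod.fst
  starts.foldl (fun functions s =>
    let line := PySem.List.pyGetD lines s ""   -- lines[s]; s is always in range
    let name := pvNameOf line
    if name == "" then functions
    else
      let e := pvScanEnd lines (pvIndentOf line) (PySem.List.pyRange (s + 1) (PySem.List.len lines) 1) (PySem.List.len lines)
      functions ++ [(name, e - s, s + 1)]) []

-- ===== PRECONDITION & SPEC =====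
def Spec_count_python_function_lines_py (lines : List String) (out : List (String × Int × Int)) : Prop := out = count_python_function_lines_py_alt lines
instance (lines : List String) (out : List (String × Int × Int)) : Decidable (Spec_count_python_function_lines_py lines out) := by unfold Spec_count_python_function_lines_py; infer_instance

-- ===== CLAIM (what is proved, stated in full; the proofs are below) =====
def Claim_equal_count_python_function_lines_py : Prop := ∀ (lines : List String), Dom_count_python_function_lines_py lines → Spec_count_python_function_lines_py lines (count_python_function_lines_py lines)

-- ===== LEMMAS AND PROOFS =====

-- common spec: A's state machine on the suffix starting at absolute index i, with only the
-- truthy part of the (current_function, function_start, indent_level) state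
def pvGo : List String → Nat → Option (String × Int × Int) → List (String × Int × Int)
  | [], i, cur =>
    (match cur with
     | some (n, s, _) => [(n, (i : Int) - s, s + 1)]
     | none => [])
  | l :: ls, i, cur =>
    if pvIsDefLine l then
      (match cur with
       | some (n, s, _) => [(n, (i : Int) - s, s + 1)]
       | none => []) ++
      pvGo ls (i + 1) (if pvNameOf l == "" then none else some (pvNameOf l, (i : Int), pvIndentOf l))
    else
      match cur with
      | some (n, s, ind) =>
        if pvIsTerm ind l then (n, (i : Int) - s, s + 1) :: pvGo ls (i + 1) none
        else pvGo ls (i + 1) cur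
      | none => pvGo ls (i + 1) none

-- number of lines of the suffix before (and excluding) the first def-or-terminator line
def pvLocalStop (ind : Int) : List String → Nat
  | [] => 0
  | l :: ls => if pvIsDefLine l || pvIsTerm ind l then 0 else pvLocalStop ind ls + 1

-- absolute indices of the def-with-colon lines of the suffix starting at k
def pvDs : List String → Nat → List Int
  | [], _ => []
  | l :: ls, k => (if pvIsDefLine l then [(k : Int)] else []) ++ pvDs ls (k + 1)

-- what B's loop body appends for one start s
def pvEmitB (lines : List String) (s : Int) : List (String × Int × Int) :=
  let line := PySem.List.pyGetD lines s ""
  let name := pvNameOf line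
  if name == "" then []
  else [(name, pvScanEnd lines (pvIndentOf line) (PySem.List.pyRange (s + 1) (PySem.List.len lines) 1) (PySem.List.len lines) - s, s + 1)]

def pvAbs (cur : Option String) (fstart indent : Int) : Option (String × Int × Int) :=
  if pvTruthy cur then some (cur.getD "", fstart, indent) else none

def pvCloseAt (st : List (String × Int × Int) × Option String × Int × Int) (total : Int) : List (String × Int × Int) :=
  if pvTruthy st.2.1 then st.1 ++ [(st.2.1.getD "", total - st.2.2.1, st.2.2.1 + 1)] else st.1


theorem pvGo_cons_none {l : String} {ls : List String} {i : Nat} (hd : pvIsDefLine l = false) :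
    pvGo (l :: ls) i none = pvGo ls (i + 1) none := by
  rw [pvGo, if_neg (ne_true_of_eq_false hd)]

theorem pvGo_cons_some {l : String} {ls : List String} {i : Nat} {n : String} {s ind : Int} (hd : pvIsDefLine l = false) :
    pvGo (l :: ls) i (some (n, s, ind)) =
      if pvIsTerm ind l then (n, (i : Int) - s, s + 1) :: pvGo ls (i + 1) none
      else pvGo ls (i + 1) (some (n, s, ind)) := by
  rw [pvGo, if_neg (ne_true_of_eq_false hd)]

theorem pvGo_cons_def_none {l : String} {ls : List String} {i : Nat} (hd : pvIsDefLine l = true) :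
    pvGo (l :: ls) i none =
      pvGo ls (i + 1) (if pvNameOf l == "" then none else some (pvNameOf l, (i : Int), pvIndentOf l)) := by
  rw [pvGo, if_pos hd]
  rfl

theorem pvGo_cons_def_some {l : String} {ls : List String} {i : Nat} {n : String} {s ind : Int} (hd : pvIsDefLine l = true) :
    pvGo (l :: ls) i (some (n, s, ind)) =
      (n, (i : Int) - s, s + 1) ::
        pvGo ls (i + 1) (if pvNameOf l == "" then none else some (pvNameOf l, (i : Int), pvIndentOf l)) := by
  rw [pvGo, if_pos hd]
  rfl

-- ---- A-side: the fold plus the final close is pvGo ----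
theorem pvA_main (ls : List String) : ∀ (k : Nat) (acc : List (String × Int × Int)) (cur : Option String) (fstart indent : Int),
    pvCloseAt (List.foldl pvAStep (acc, cur, fstart, indent) (PySem.List.enumerate ls (k : Int))) ((k : Int) + PySem.List.len ls)
      = acc ++ pvGo ls k (pvAbs cur fstart indent) := by
  induction ls with
  | nil =>
    intro k acc cur fstart indent
    cases cur with
    | none => simp [pvCloseAt, pvAbs, pvTruthy, pvGo, PySem.List.enumerate]
    | some n =>
      by_cases hn : n == "" <;>
        simp [pvCloseAt, pvAbs, pvTruthy, pvGo, PySem.List.enumerate, PySem.List.len_eq, hn]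
  | cons l ls ih =>
    intro k acc cur fstart indent
    have henum : PySem.List.enumerate (l :: ls) (k : Int) = ((k : Int), l) :: PySem.List.enumerate ls ((k : Int) + 1) := rfl
    have hcast : ((k : Int) + 1) = ((k + 1 : Nat) : Int) := by push_cast; ring
    have htot : (k : Int) + PySem.List.len (l :: ls) = ((k + 1 : Nat) : Int) + PySem.List.len ls := by
      simp [PySem.List.len_eq]
      ring_nf
    rw [henum, List.foldl_cons, htot]
    by_cases hd : pvIsDefLine l
    · -- the def-with-colon branch
      have hd' : (PySem.Str.startswith (PySem.Str.strip l) "def " && PySem.Str.isIn ":" (PySem.Str.strip l)) = true := by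
        simpa [pvIsDefLine] using hd
      have hstep : pvAStep (acc, cur, fstart, indent) ((k : Int), l)
          = ((if pvTruthy cur then acc ++ [(cur.getD "", (k : Int) - fstart, fstart + 1)] else acc),
             some (pvNameOf l), (k : Int), pvIndentOf l) := by
        simp only [pvAStep, pvNameOf, pvIndentOf]
        rw [if_pos hd']
      rw [hstep, hcast, ih (k + 1) _ (some (pvNameOf l)) ((k : Int)) (pvIndentOf l)]
      have habs : pvAbs (some (pvNameOf l)) ((k : Int)) (pvIndentOf l)
          = (if pvNameOf l == "" then none else some (pvNameOf l, (k : Int), pvIndentOf l)) := by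
        by_cases h : pvNameOf l == "" <;> simp [pvAbs, pvTruthy, h]
      rw [habs]
      cases cur with
      | none =>
        rw [show pvAbs none fstart indent = none from rfl, pvGo_cons_def_none hd]
        simp [pvTruthy]
      | some n =>
        by_cases hn : n == ""
        · rw [show pvAbs (some n) fstart indent = none from by simp [pvAbs, pvTruthy, hn],
            pvGo_cons_def_none hd]
          simp [pvTruthy, hn]
        · rw [show pvAbs (some n) fstart indent = some (n, fstart, indent) from by simp [pvAbs, pvTruthy, hn],
            pvGo_cons_def_some hd]
          simp [pvTruthy, hn]
    · -- not a def line
      have hd' : (PySem.Str.startswith (PySem.Str.strip l) "def " && PySem.Str.isIn ":" (PySem.Str.strip l)) = false := by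
        rw [Bool.eq_false_iff]
        simpa [pvIsDefLine] using hd
      have hdf : pvIsDefLine l = false := Bool.eq_false_iff.mpr hd
      cases cur with
      | none =>
        have hstep : pvAStep (acc, none, fstart, indent) ((k : Int), l) = (acc, none, fstart, indent) := by
          simp only [pvAStep]
          rw [if_neg (ne_true_of_eq_false hd')]
          simp only [pvTruthy, Bool.false_and, Bool.false_eq_true, if_false]
        rw [hstep, hcast, ih (k + 1) acc none fstart indent,
          show pvAbs none fstart indent = none from rfl, pvGo_cons_none hdf]
      | some n =>
        by_cases hn : n == ""
        · have hstep : pvAStep (acc, some n, fstart, indent) ((k : Int), l) = (acc, some n, fstart, indent) := by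
            simp only [pvAStep]
            rw [if_neg (ne_true_of_eq_false hd')]
            simp only [pvTruthy, hn, Bool.not_true, Bool.false_and, Bool.false_eq_true, if_false]
          rw [hstep, hcast, ih (k + 1) acc (some n) fstart indent,
            show pvAbs (some n) fstart indent = none from by simp [pvAbs, pvTruthy, hn],
            pvGo_cons_none hdf]
        · have hnb : (!(n == "")) = true := by simp [hn]
          have habs : pvAbs (some n) fstart indent = some (n, fstart, indent) := by
            simp [pvAbs, pvTruthy, hn]
          have htval : pvIsTerm indent l
              = (!(PySem.Str.strip l == "") && !(PySem.Str.startswith l (pvSpaces (indent + 1))) && !(PySem.Str.startswith (PySem.Str.strip l) "#") && !(PySem.Str.startswith (PySem.Str.strip l) "def ")) := rfl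
          by_cases hdp : PySem.Str.startswith (PySem.Str.strip l) "def "
          · -- a def-prefixed non-def line never changes the state
            have ht : pvIsTerm indent l = false := by
              rw [htval, hdp]
              simp only [Bool.not_true, Bool.and_false]
            have hstep : pvAStep (acc, some n, fstart, indent) ((k : Int), l) = (acc, some n, fstart, indent) := by
              simp only [pvAStep]
              rw [if_neg (ne_true_of_eq_false hd'), hdp]
              simp only [Bool.not_true, Bool.false_eq_true, if_false, ite_self]
            rw [hstep, hcast, ih (k + 1) acc (some n) fstart indent, habs,
              pvGo_cons_some hdf, if_neg (ne_true_of_eq_false ht)]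
          · have hdp' : PySem.Str.startswith (PySem.Str.strip l) "def " = false := Bool.eq_false_iff.mpr hdp
            by_cases hg3 : (!(PySem.Str.strip l == "") && !(PySem.Str.startswith l (pvSpaces (indent + 1))) && !(PySem.Str.startswith (PySem.Str.strip l) "#")) = true
            · -- terminator: the open function is closed here
              have ht : pvIsTerm indent l = true := by
                rw [htval, hdp']
                simp only [Bool.not_false, Bool.and_true]
                exact hg3
              have hstep : pvAStep (acc, some n, fstart, indent) ((k : Int), l)
                  = (acc ++ [(n, (k : Int) - fstart, fstart + 1)], none, fstart, indent) := by
                simp only [pvAStep]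
                rw [if_neg (ne_true_of_eq_false hd'), hdp']
                have hcond : (pvTruthy (some n) && !(PySem.Str.strip l == "") && !(PySem.Str.startswith l (pvSpaces (indent + 1))) && !(PySem.Str.startswith (PySem.Str.strip l) "#")) = true := by
                  simp only [pvTruthy, hnb, Bool.true_and]
                  exact hg3
                rw [if_pos hcond]
                simp only [Bool.not_false, if_true, Option.getD_some]
              rw [hstep, hcast, ih (k + 1) _ none fstart indent,
                show pvAbs none fstart indent = none from rfl, habs,
                pvGo_cons_some hdf, if_pos ht]
              simp
            · -- guard false: nothing happens
              have hg3' : (!(PySem.Str.strip l == "") && !(PySem.Str.startswith l (pvSpaces (indent + 1))) && !(PySem.Str.startswith (PySem.Str.strip l) "#")) = false := Bool.eq_false_iff.mpr hg3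
              have ht : pvIsTerm indent l = false := by
                rw [htval, hg3']
                simp only [Bool.false_and]
              have hstep : pvAStep (acc, some n, fstart, indent) ((k : Int), l) = (acc, some n, fstart, indent) := by
                simp only [pvAStep]
                rw [if_neg (ne_true_of_eq_false hd')]
                have hcond : (pvTruthy (some n) && !(PySem.Str.strip l == "") && !(PySem.Str.startswith l (pvSpaces (indent + 1))) && !(PySem.Str.startswith (PySem.Str.strip l) "#")) = false := by
                  simp only [pvTruthy, hnb, Bool.true_and]
                  exact hg3' 
                rw [if_neg (ne_true_of_eq_false hcond)]
              rw [hstep, hcast, ih (k + 1) acc (some n) fstart indent, habs,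
                pvGo_cons_some hdf, if_neg (ne_true_of_eq_false ht)]

-- ---- B-side bridges ----
theorem pvScan_bridge (lines : List String) (ind : Int) : ∀ (j : Nat), j ≤ lines.length →
    pvScanEnd lines ind (PySem.List.pyRange ((j : Int)) (PySem.List.len lines) 1) (PySem.List.len lines)
      = ((j + pvLocalStop ind (lines.drop j) : Nat) : Int) := by
  have main : ∀ (f j : Nat), j ≤ lines.length → lines.length - j ≤ f →
      pvScanEnd lines ind (PySem.List.pyRange ((j : Int)) (PySem.List.len lines) 1) (PySem.List.len lines)
        = ((j + pvLocalStop ind (lines.drop j) : Nat) : Int) := by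
    intro f
    induction f with
    | zero =>
      intro j hj hf
      have hje : j = lines.length := by omega
      subst hje
      rw [PySem.List.pyRange_one_eq_nil (by simp [PySem.List.len_eq])]
      simp [pvScanEnd, PySem.List.len_eq, pvLocalStop]
    | succ f ihf =>
      intro j hj hf
      by_cases hje : j = lines.length
      · subst hje
        rw [PySem.List.pyRange_one_eq_nil (by simp [PySem.List.len_eq])]
        simp [pvScanEnd, PySem.List.len_eq, pvLocalStop]
      · have hjl : j < lines.length := by omega
        rw [PySem.List.pyRange_one_cons (a := (j : Int)) (b := PySem.List.len lines)
            (by rw [PySem.List.len_eq]; exact_mod_cast hjl)]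
        have hnxt : PySem.List.pyGetD lines ((j : Int)) "" = lines[j] := by
          rw [PySem.List.pyGetD_natCast]
          exact List.getD_eq_getElem lines "" hjl
        have hdrop : lines.drop j = lines[j] :: lines.drop (j + 1) :=
          List.drop_eq_getElem_cons hjl
        rw [pvScanEnd, hdrop, pvLocalStop]
        by_cases hd : pvIsDefLine lines[j]
        · simp [hnxt, hd]
        · by_cases ht : pvIsTerm ind lines[j]
          · simp [hnxt, hd, ht]
          · simp only [hnxt, hd, ht, Bool.false_eq_true, if_false, Bool.or_self]
            rw [show ((j : Int) + 1) = ((j + 1 : Nat) : Int) by push_cast; ring,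
              ihf (j + 1) (by omega) (by omega)]
            push_cast
            ring
  exact fun j hj => main (lines.length - j) j hj le_rfl

theorem pvGo_open (ls : List String) : ∀ (i : Nat) (n : String) (s ind : Int),
    pvGo ls i (some (n, s, ind))
      = (n, ((i + pvLocalStop ind ls : Nat) : Int) - s, s + 1)
          :: pvGo (ls.drop (pvLocalStop ind ls)) (i + pvLocalStop ind ls) none := by
  induction ls with
  | nil => intro i n s ind; simp [pvGo, pvLocalStop]
  | cons l ls ih =>
    intro i n s ind
    by_cases hd : pvIsDefLine l
    · simp [pvGo, pvLocalStop, hd]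
    · by_cases ht : pvIsTerm ind l
      · simp [pvGo, pvLocalStop, hd, ht]
      · have h0 : ¬ (pvIsDefLine l || pvIsTerm ind l) = true := by simp [hd, ht]
        rw [pvLocalStop, if_neg h0]
        have hL : pvGo (l :: ls) i (some (n, s, ind)) = pvGo ls (i + 1) (some (n, s, ind)) := by
          simp [pvGo, hd, ht]
        rw [hL, ih (i + 1) n s ind, List.drop_succ_cons,
          show i + (pvLocalStop ind ls + 1) = (i + 1) + pvLocalStop ind ls by omega]

theorem pvDs_skip (ind : Int) : ∀ (ls : List String) (k : Nat),
    pvDs (ls.drop (pvLocalStop ind ls)) (k + pvLocalStop ind ls) = pvDs ls k := by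
  intro ls
  induction ls with
  | nil => intro k; simp [pvLocalStop]
  | cons l ls ih =>
    intro k
    by_cases h : (pvIsDefLine l || pvIsTerm ind l)
    · simp [pvLocalStop, h]
    · have hd : ¬ pvIsDefLine l = true := by
        intro hdef; exact h (by simp [hdef])
      rw [pvLocalStop, if_neg h, pvDs]
      simp only [hd, Bool.false_eq_true, if_false, List.nil_append, List.drop_succ_cons]
      rw [show k + (pvLocalStop ind ls + 1) = (k + 1) + pvLocalStop ind ls by omega]
      exact ih (k + 1)

theorem pvGo_none (lines : List String) : ∀ (N : Nat) (ls : List String) (k : Nat), ls.length ≤ N → ls = lines.drop k →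
    pvGo ls k none = (pvDs ls k).flatMap (pvEmitB lines) := by
  intro N
  induction N with
  | zero =>
    intro ls k hlen _
    have : ls = [] := List.eq_nil_of_length_eq_zero (by omega)
    subst this
    simp [pvGo, pvDs]
  | succ N ih =>
    intro ls k hlen hls
    match ls, hls with
    | [], _ => simp [pvGo, pvDs]
    | l :: ls', hls =>
      have hk : k < lines.length := by
        by_contra hge
        have : lines.drop k = [] := List.drop_eq_nil_of_le (by omega)
        rw [← hls] at this
        exact List.cons_ne_nil _ _ this
      have hget? : lines[k]? = some l := by
        have h0 : (lines.drop k)[0]? = some l := by rw [← hls]; rfl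
        rwa [List.getElem?_drop, Nat.add_zero] at h0
      have hgl : lines[k] = l := by
        have := List.getElem?_eq_getElem hk (l := lines)
        rw [hget?] at this
        exact (Option.some_injective _ this.symm)
      have hgetD : PySem.List.pyGetD lines ((k : Int)) "" = l := by
        rw [PySem.List.pyGetD_natCast, List.getD_eq_getElem lines "" hk, hgl]
      have hds' : ls' = lines.drop (k + 1) := by
        have : lines.drop (k + 1) = (lines.drop k).drop 1 := by
          rw [List.drop_drop]
        rw [this, ← hls, List.drop_one, List.tail_cons]
      have hlen' : ls'.length ≤ N := by
        simp only [List.length_cons] at hlen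
        omega
      by_cases hd : pvIsDefLine l
      · rw [pvGo, if_pos hd, pvDs, if_pos hd]
        by_cases hn : pvNameOf l == ""
        · rw [if_pos hn]
          have hemit : pvEmitB lines ((k : Int)) = [] := by
            simp only [pvEmitB, hgetD]
            rw [if_pos hn]
          simp only [List.singleton_append, List.flatMap_cons, hemit, List.nil_append]
          exact ih ls' (k + 1) hlen' hds'
        · rw [if_neg hn]
          rw [pvGo_open ls' (k + 1) (pvNameOf l) ((k : Int)) (pvIndentOf l)]
          have hscan := pvScan_bridge lines (pvIndentOf l) (k + 1) (by omega)
          rw [← hds'] at hscan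
          have hemit : pvEmitB lines ((k : Int)) =
              [(pvNameOf l, (((k + 1) + pvLocalStop (pvIndentOf l) ls' : Nat) : Int) - (k : Int), (k : Int) + 1)] := by
            simp only [pvEmitB, hgetD]
            rw [if_neg hn]
            rw [show ((k : Int) + 1) = ((k + 1 : Nat) : Int) by push_cast; ring, hscan]
          have htail : pvGo (ls'.drop (pvLocalStop (pvIndentOf l) ls')) ((k + 1) + pvLocalStop (pvIndentOf l) ls') none
              = (pvDs ls' (k + 1)).flatMap (pvEmitB lines) := by
            rw [ih (ls'.drop (pvLocalStop (pvIndentOf l) ls')) ((k + 1) + pvLocalStop (pvIndentOf l) ls')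
                (by rw [List.length_drop]; omega)
                (by rw [hds', List.drop_drop])]
            rw [pvDs_skip (pvIndentOf l) ls' (k + 1)]
          rw [htail]
          simp [hemit]
      · rw [pvGo, if_neg hd, pvDs, if_neg hd]
        simp only [List.nil_append]
        exact ih ls' (k + 1) hlen' hds' 

theorem pvStarts_eq (ls : List String) : ∀ (k : Nat),
    ((PySem.List.enumerate ls (k : Int)).filter (fun p => pvIsDefLine p.2)).map Prod.fst
      = pvDs ls k := by
  induction ls with
  | nil => intro k; simp [PySem.List.enumerate, pvDs]
  | cons l ls ih =>
    intro k
    have h1 : PySem.List.enumerate (l :: ls) (k : Int) = ((k : Int), l) :: PySem.List.enumerate ls ((k : Int) + 1) := rfl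
    have h2 : ((k : Int) + 1) = ((k + 1 : Nat) : Int) := by push_cast; ring
    rw [h1, h2, List.filter_cons, pvDs]
    by_cases h : pvIsDefLine l
    · simp only [h, if_true, List.map_cons, ih (k + 1), List.singleton_append]
    · simp only [h, Bool.false_eq_true, if_false, ih (k + 1), List.nil_append]

theorem pvB_eq_flatMap (lines : List String) :
    count_python_function_lines_py_alt lines = (pvDs lines 0).flatMap (pvEmitB lines) := by
  unfold count_python_function_lines_py_alt
  have hs : ((PySem.List.enumerate lines 0).filter (fun p => pvIsDefLine p.2)).map Prod.fst
      = pvDs lines 0 := by simpa using pvStarts_eq lines 0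
  have hb : (fun (functions : List (String × Int × Int)) (s : Int) =>
        let line := PySem.List.pyGetD lines s ""
        let name := pvNameOf line
        if name == "" then functions
        else
          let e := pvScanEnd lines (pvIndentOf line) (PySem.List.pyRange (s + 1) (PySem.List.len lines) 1) (PySem.List.len lines)
          functions ++ [(name, e - s, s + 1)])
      = fun functions s => functions ++ pvEmitB lines s := by
    funext fns s
    simp only [pvEmitB]
    split <;> simp
  rw [hs, hb]
  simpa using PySem.List.foldl_append_eq_flatMap (pvEmitB lines) (pvDs lines 0) []

-- ===== VERDICT (by name: the statement is the Claim_ definition above) =====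
theorem count_python_function_lines_py_spec : Claim_equal_count_python_function_lines_py := by
  intro lines _
  unfold Spec_count_python_function_lines_py
  have hA : count_python_function_lines_py lines = pvGo lines 0 none := by
    have h := pvA_main lines 0 [] none 0 0
    simpa [count_python_function_lines_py, pvCloseAt, pvAbs, pvTruthy] using h
  rw [hA, pvB_eq_flatMap lines]
  exact pvGo_none lines lines.length lines 0 le_rfl (by simp)
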